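-- pv_equiv track=rewrite | github.com/JakubKazimierski/PythonPortfolio | Easy/PalindromeSwapper/PalindromeSwapper.py | PalindromeSwapper
-- ===== SOURCE A (Python) =====
-- def PalindromeSwapper(strParam):
--     '''
--     Have the function PalindromeSwapper(strParam)
--     take the str parameter being passed and determine
--     if a palindrome can be created by swapping two
--     adjacent characters in the string.
--     If it is possible to create a palindrome,
--     then your program should return the palindrome,
--     if not then return the string -1.
--     The input string will only contain alphabetic
--     characters.
--
--     For example: if str is "rcaecar" then you can create
--     a palindrome by swapping the second and third characters,
--     so your program should return the string "racecar" which
--     is the final palindromic string.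
--     '''
--
--     try:
--         # if input already is palindrome
--         if strParam[::-1] == strParam:
--             return strParam
--
--         # below cheks each possible swap in string
--         tempString = list(strParam)
--         for index in range(0, len(tempString)-1):
--
--             tempString[index], tempString[index+1] = tempString[index+1], tempString[index]
--
--             if "".join(tempString)[::-1] == "".join(tempString):
--                 return "".join(tempString)
--
--             tempString = list(strParam)
--
--         return "-1"
--
--     except(TypeError):
--         return -1
-- ===== SOURCE B (Python) =====
-- def PalindromeSwapper(strParam):
--     # O(n): any successful adjacent swap must touch a mismatched symmetric pair,
--     # so only <= 4 candidate swap positions need an O(n) palindrome test.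
--     s = strParam
--     n = len(s)
--     if s == s[::-1]:
--         return s
--     i = next((k for k in range(n) if s[k] != s[n - 1 - k]), 0)
--     for k in sorted({x for x in (i - 1, i, n - 2 - i, n - 1 - i) if 0 <= x <= n - 2}):
--         t = s[:k] + s[k + 1] + s[k] + s[k + 2:]
--         if t == t[::-1]:
--             return t
--     return "-1"
-- ===== Notes on version B (the rewrite author's own statement) =====
-- stated objective: faster
-- what changed: A tries every adjacent swap and re-checks the whole string each time (O(n^2)); B finds one mismatched symmetric pair and tests only the <= 4 swap positions that touch it, since any successful swap must touch every mismatched pair (O(n)).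
import Mathlib
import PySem

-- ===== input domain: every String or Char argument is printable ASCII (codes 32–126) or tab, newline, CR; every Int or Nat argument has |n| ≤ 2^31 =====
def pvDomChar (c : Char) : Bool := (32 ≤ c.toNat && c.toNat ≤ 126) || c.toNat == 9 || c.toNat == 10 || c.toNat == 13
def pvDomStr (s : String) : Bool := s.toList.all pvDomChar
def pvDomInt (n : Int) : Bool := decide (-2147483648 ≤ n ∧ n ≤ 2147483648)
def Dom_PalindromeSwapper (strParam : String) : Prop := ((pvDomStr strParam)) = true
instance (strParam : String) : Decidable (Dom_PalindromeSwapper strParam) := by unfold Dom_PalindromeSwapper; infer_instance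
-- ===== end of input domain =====

-- B replaces A's try-every-adjacent-swap scan by an O(n) analysis: any successful swap must
-- touch a mismatched symmetric pair, so only ≤ 4 candidate positions need a palindrome test.


-- ===== PORT A =====
-- tempString[index], tempString[index+1] = tempString[index+1], tempString[index]
-- (simultaneous assignment: both right-hand sides read the ORIGINAL list; indices are
-- in range in A's loop, so the getD defaults are never used)
def pvSwapA (l : List Char) (k : Nat) : List Char :=
  (l.set k (l.getD (k+1) ' ')).set (k+1) (l.getD k ' ')

-- the for-loop over range(0, len-1): first swap whose join reversed equals itself
-- ("".join(t)[::-1] == "".join(t) is exactly list-reverse equality of t)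
def pvLoopA (l : List Char) : List Nat → String
  | [] => "-1"
  | k :: ks =>
    let t := pvSwapA l k
    if t.reverse = t then String.ofList t else pvLoopA l ks

def PalindromeSwapper (strParam : String) : String :=
  let l := strParam.toList
  -- strParam[::-1] == strParam  (string reverse-compare = list reverse-compare)
  if l.reverse = l then strParam
  -- range(0, len-1) = [0, …, len-2]; empty when len = 0, as Nat subtraction gives
  else pvLoopA l (List.range (l.length - 1))
  -- A's `except TypeError` is unreachable for a str argument: no port needed

-- ===== PORT B =====
-- t = s[:k] + s[k+1] + s[k] + s[k+2:]  (k is filtered to 0 ≤ k ≤ n-2, so the pyGetD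
-- defaults are never used)
def pvSwapB (l : List Char) (k : Int) : List Char :=
  PySem.List.slice l none (some k)
    ++ [PySem.List.pyGetD l (k+1) ' ', PySem.List.pyGetD l k ' ']
    ++ PySem.List.slice l (some (k+2)) none

-- for k in cands: if t == t[::-1]: return t   … return "-1"
def pvLoopB (l : List Char) : List Int → String
  | [] => "-1"
  | k :: ks =>
    let t := pvSwapB l k
    if t = t.reverse then String.ofList t else pvLoopB l ks

def PalindromeSwapper_alt (strParam : String) : String :=
  let l := strParam.toList
  let n := l.length
  if l = l.reverse then strParam
  else
    -- i = next((k for k in range(n) if s[k] != s[n-1-k]), 0); k < n so s[k], s[n-1-k]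
    -- are in range (Nat subtraction n-1-k agrees with Python's since k ≤ n-1)
    let i : Nat := ((List.range n).find? (fun k => !(l.getD k ' ' == l.getD (n-1-k) ' '))).getD 0
    -- sorted({x for x in (i-1, i, n-2-i, n-1-i) if 0 <= x <= n-2})
    pvLoopB l (PySem.List.sorted (PySem.Set.ofList
      (([(i:Int)-1, (i:Int), (n:Int)-2-(i:Int), (n:Int)-1-(i:Int)]).filter
        (fun x => decide (0 ≤ x ∧ x ≤ (n:Int)-2)))) (fun x => x) false)

-- ===== PRECONDITION & SPEC =====
def Spec_PalindromeSwapper (strParam : String) (out : String) : Prop := out = PalindromeSwapper_alt strParam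
instance (strParam : String) (out : String) : Decidable (Spec_PalindromeSwapper strParam out) := by unfold Spec_PalindromeSwapper; infer_instance

-- ===== CLAIM (what is proved, stated in full; the proofs are below) =====
def Claim_equal_PalindromeSwapper : Prop := ∀ (strParam : String), Dom_PalindromeSwapper strParam → Spec_PalindromeSwapper strParam (PalindromeSwapper strParam)

-- ===== LEMMAS AND PROOFS =====

theorem pvLenSwapA (l : List Char) (k : Nat) : (pvSwapA l k).length = l.length := by
  simp [pvSwapA]

-- reverse = self is the pointwise symmetric-pair condition
theorem pvPalIff (t : List Char) :
    t.reverse = t ↔ ∀ j (_ : j < t.length), t[j] = t[t.length-1-j]'(by omega) := by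
  constructor
  · intro h j hj
    have h0 : t.reverse[j]? = t[j]? := by rw [h]
    rw [List.getElem?_reverse (by simpa using hj)] at h0
    rw [List.getElem?_eq_getElem hj] at h0
    rw [List.getElem?_eq_getElem (show t.length-1-j < t.length by omega)] at h0
    exact (Option.some.inj h0).symm
  · intro h
    apply List.ext_getElem (by simp)
    intro j h1 h2
    rw [List.getElem_reverse]
    exact (h (t.length-1-j) (by omega)).trans
      (getElem_congr rfl (show t.length-1-(t.length-1-j) = j by omega) (by omega))

theorem pvSwapA_eq (l : List Char) (k : Nat) (hk : k + 1 < l.length) :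
    pvSwapA l k = l.take k ++ [l[k+1], l[k]] ++ l.drop (k+2) := by
  rw [pvSwapA, List.getD_eq_getElem l ' ' hk, List.getD_eq_getElem l ' ' (show k<l.length by omega)]
  rw [List.set_eq_take_cons_drop _ (show k < l.length by omega)]
  rw [List.set_eq_take_cons_drop _ (by simp; omega)]
  simp [List.take_append, List.drop_append, List.take_take,
    Nat.min_eq_left (le_of_lt (show k < l.length by omega)),
    show k+1-k = 1 by omega, show k+1+1-k = 2 by omega,
    List.drop_eq_nil_of_le (show (List.take k l).length ≤ k+1+1 by simp; omega),
    List.drop_drop]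

theorem pvSwapB_eq (l : List Char) (k : Int) (h0 : 0 ≤ k) (hk : k.toNat + 1 < l.length) :
    pvSwapB l k = l.take k.toNat ++ [l[k.toNat+1], l[k.toNat]] ++ l.drop (k.toNat+2) := by
  rw [pvSwapB, PySem.List.slice_to l h0, PySem.List.slice_from l (by omega : (0:Int) ≤ k + 2)]
  rw [PySem.List.pyGetD_eq_getElem l ' ' (by omega) (by omega),
      PySem.List.pyGetD_eq_getElem l ' ' h0 (by omega)]
  have e1 : (k+1).toNat = k.toNat + 1 := by omega
  have e2 : (k+2).toNat = k.toNat + 2 := by omega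
  have g1 : l[(k+1).toNat]'(by omega) = l[k.toNat+1]'(by omega) := getElem_congr rfl e1 (by omega)
  rw [g1, e2]

theorem pvGetSwapA (l : List Char) (k j : Nat) (hj : j < l.length)
    (hjk : j ≠ k) (hjk1 : j ≠ k + 1) :
    (pvSwapA l k)[j]'(by rw [pvLenSwapA]; exact hj) = l[j] := by
  simp [pvSwapA, Ne.symm hjk, Ne.symm hjk1]

-- a successful swap must touch the mismatched pair (i0, n-1-i0)
theorem pvKey (l : List Char) (i0 : Nat) (hi : i0 < l.length)
    (hm : l[i0] ≠ l[l.length-1-i0]'(by omega)) (k : Nat) (_hk : k + 1 < l.length)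
    (hQ : (pvSwapA l k).reverse = pvSwapA l k) :
    k = i0 ∨ k + 1 = i0 ∨ k = l.length - 1 - i0 ∨ k + 1 = l.length - 1 - i0 := by
  by_contra hcon
  push Not at hcon
  obtain ⟨h1, h2, h3, h4⟩ := hcon
  have hlen := pvLenSwapA l k
  have hpal := (pvPalIff (pvSwapA l k)).mp hQ i0 (by omega)
  have e0 : (pvSwapA l k).length - 1 - i0 = l.length - 1 - i0 := by omega
  have hpal' : (pvSwapA l k)[i0]'(by omega) = (pvSwapA l k)[l.length-1-i0]'(by omega) :=
    hpal.trans (getElem_congr rfl e0 (by omega))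
  have eA : (pvSwapA l k)[i0]'(by omega) = l[i0] :=
    pvGetSwapA l k i0 hi (Ne.symm h1) (Ne.symm h2)
  have eB : (pvSwapA l k)[l.length-1-i0]'(by omega) = l[l.length-1-i0]'(by omega) :=
    pvGetSwapA l k _ (by omega) (Ne.symm h3) (Ne.symm h4)
  exact hm (eA.symm.trans (hpal'.trans eB))

theorem pvLoopA_find (l : List Char) (ks : List Nat) :
    pvLoopA l ks = match ks.find? (fun k => decide ((pvSwapA l k).reverse = pvSwapA l k)) with
      | some k => String.ofList (pvSwapA l k)
      | none => "-1" := by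
  induction ks with
  | nil => rfl
  | cons k ks ih =>
    rw [pvLoopA, List.find?_cons]
    by_cases h : (pvSwapA l k).reverse = pvSwapA l k
    · rw [if_pos h, decide_eq_true h]
    · rw [if_neg h, decide_eq_false h, ih]

theorem pvLoopB_find (l : List Char) (ks : List Int) :
    pvLoopB l ks = match ks.find? (fun k => decide (pvSwapB l k = (pvSwapB l k).reverse)) with
      | some k => String.ofList (pvSwapB l k)
      | none => "-1" := by
  induction ks with
  | nil => rfl
  | cons k ks ih =>
    rw [pvLoopB, List.find?_cons]
    by_cases h : pvSwapB l k = (pvSwapB l k).reverse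
    · rw [if_pos h, decide_eq_true h]
    · rw [if_neg h, decide_eq_false h, ih]

-- ===== VERDICT (by name: the statement is the Claim_ definition above) =====
-- the two loops, expressed through find?, visit the same first successful swap
theorem pvMain (l : List Char) (i0 : Nat)
    (hmatch : (List.range l.length).find?
      (fun k => !(l.getD k ' ' == l.getD (l.length-1-k) ' ')) = some i0) :
    pvLoopA l (List.range (l.length - 1)) =
    pvLoopB l (PySem.List.sorted (PySem.Set.ofList
      (([(i0:Int)-1, (i0:Int), (l.length:Int)-2-(i0:Int), (l.length:Int)-1-(i0:Int)]).filter
        (fun x => decide (0 ≤ x ∧ x ≤ (l.length:Int)-2)))) (fun x => x) false) := by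
  set n := l.length with hn
  set C := PySem.List.sorted (PySem.Set.ofList
      (([(i0:Int)-1, (i0:Int), (n:Int)-2-(i0:Int), (n:Int)-1-(i0:Int)]).filter
        (fun x => decide (0 ≤ x ∧ x ≤ (n:Int)-2)))) (fun x => x) false with hC
  set QA := (fun k => decide ((pvSwapA l k).reverse = pvSwapA l k)) with hQA
  set QB := (fun k => decide (pvSwapB l k = (pvSwapB l k).reverse)) with hQB
  have hi0n : i0 < n := List.mem_range.mp (List.mem_of_find?_eq_some hmatch)
  have hmis : l[i0]'hi0n ≠ l[n-1-i0]'(by omega) := by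
    have hQi := List.find?_some hmatch
    rw [List.getD_eq_getElem l ' ' hi0n, List.getD_eq_getElem l ' ' (show n-1-i0<n by omega)] at hQi
    simpa using hQi
  have hCmem : ∀ x : Int, x ∈ C ↔
      ((x = (i0:Int)-1 ∨ x = (i0:Int) ∨ x = (n:Int)-2-(i0:Int) ∨ x = (n:Int)-1-(i0:Int)) ∧
        0 ≤ x ∧ x ≤ (n:Int)-2) := by
    intro x
    rw [hC, PySem.List.mem_sorted, PySem.Set.mem_ofList, List.mem_filter]
    simp only [List.mem_cons, decide_eq_true_eq, List.not_mem_nil, or_false]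
  have hCp : C.Pairwise (· < ·) := PySem.List.sorted_ofList_pairwise_lt _
  have hQBA : ∀ x : Int, 0 ≤ x → x.toNat < n - 1 → QB x = QA x.toNat := by
    intro x h0 hx
    have hswap : pvSwapB l x = pvSwapA l x.toNat := by
      rw [pvSwapB_eq l x h0 (by omega), pvSwapA_eq l x.toNat (by omega)]
    rw [hQB, hQA]
    exact decide_eq_decide.mpr (by rw [hswap]; exact eq_comm)
  have hFilter : ((C.filter QB).map Int.toNat) = (List.range (n-1)).filter QA := by
    have hnonneg : ∀ x ∈ C.filter QB, 0 ≤ x := by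
      intro x hx
      exact ((hCmem x).mp (List.mem_of_mem_filter hx)).2.1
    have hperm : ((C.filter QB).map Int.toNat).Perm ((List.range (n-1)).filter QA) := by
      refine (List.perm_ext_iff_of_nodup ?_ ?_).mpr ?_
      · refine List.Nodup.map_on ?_ ((hCp.filter QB).imp (fun h => Int.ne_of_lt h))
        intro a ha b hb hab
        have := hnonneg a ha; have := hnonneg b hb; omega
      · exact ((List.pairwise_lt_range).filter QA).imp (fun h => Nat.ne_of_lt h)
      · intro j
        constructor
        · intro hj
          obtain ⟨x, hx, hxj⟩ := List.mem_map.mp hj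
          have hxC := List.mem_of_mem_filter hx
          have hb := ((hCmem x).mp hxC).2
          have hQ := List.of_mem_filter hx
          rw [List.mem_filter]
          constructor
          · exact List.mem_range.mpr (by omega)
          · rw [← hxj, ← hQBA x hb.1 (by omega)]; exact hQ
        · intro hj
          rw [List.mem_filter] at hj
          obtain ⟨hjr, hQ⟩ := hj
          have hjn : j < n - 1 := List.mem_range.mp hjr
          have hdisj := pvKey l i0 hi0n hmis j (by omega)
            (of_decide_eq_true hQ)
          refine List.mem_map.mpr ⟨(j:Int), ?_, Int.toNat_natCast j⟩
          rw [List.mem_filter]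
          constructor
          · rw [hCmem]
            refine ⟨?_, by omega, by omega⟩
            rcases hdisj with h | h | h | h
            · right; left; omega
            · left; omega
            · right; right; right; omega
            · right; right; left; omega
          · rw [hQBA (j:Int) (by omega) (by simpa using hjn)]
            simpa using hQ
    refine hperm.eq_of_pairwise (fun a b _ _ h1 h2 => absurd h2 (Nat.lt_asymm h1)) ?_
      ((List.pairwise_lt_range).filter QA)
    rw [List.pairwise_map]
    refine List.Pairwise.imp_of_mem ?_ (hCp.filter QB)
    intro a b ha hb hab
    have := hnonneg a ha; have := hnonneg b hb; omega
  have hfind : (List.range (n-1)).find? QA = (C.find? QB).map Int.toNat := by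
    rw [← List.head?_filter, ← hFilter, List.head?_map, List.head?_filter]
  rw [pvLoopA_find, pvLoopB_find, ← hQA, ← hQB, hfind]
  rcases hb : C.find? QB with _ | x
  · rfl
  · have hxC := List.mem_of_find?_eq_some hb
    have hbd := ((hCmem x).mp hxC).2
    simp only [Option.map_some]
    have hswap : pvSwapB l x = pvSwapA l x.toNat := by
      rw [pvSwapB_eq l x hbd.1 (by omega), pvSwapA_eq l x.toNat (by omega)]
    rw [hswap]

theorem PalindromeSwapper_spec : Claim_equal_PalindromeSwapper := by
  intro s _
  unfold Spec_PalindromeSwapper PalindromeSwapper PalindromeSwapper_alt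
  simp only []
  by_cases hp : s.toList.reverse = s.toList
  · rw [if_pos hp, if_pos hp.symm]
  · rw [if_neg hp, if_neg (fun h => hp h.symm)]
    rcases hmatch : (List.range s.toList.length).find?
        (fun k => !(s.toList.getD k ' ' == s.toList.getD (s.toList.length-1-k) ' ')) with _ | i0
    · exfalso
      apply hp
      rw [pvPalIff]
      intro j hj
      have hno := List.find?_eq_none.mp hmatch j (List.mem_range.mpr hj)
      rw [List.getD_eq_getElem _ ' ' hj,
        List.getD_eq_getElem _ ' ' (show s.toList.length-1-j < s.toList.length by omega)] at hno
      simpa using hno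
    · simp only [Option.getD_some]
      exact pvMain s.toList i0 hmatch
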